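-- pv_equiv track=rewrite | github.com/epcarr/Spikes_Steganography | Website/main.py | decode_single_char
-- ===== SOURCE A (Python) =====
-- def even_or_odd_bit(num:int)->str:
--     '''
--     This function determines if a number is even or odd
--     using the modulo operator.
--
--     Args:
--         - num (int)
--
--     Returns
--         - str
--     '''
--     if num % 2 == 1:
--         number= '1'
--     elif num % 2 == 0:
--         number= '0'
--     return number
--
-- def decode_single_char(intensity_values: list[int] )-> str:
--     '''
--     This function grabs a list of integers and converts them into a binary string
--     based on if it is even or odd via the even_or_odd_bit function defined earlier.
--
--     Args:
--         - nums: (list[int])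
--
--     Returns:
--         - str
--
--     '''
--     new_message = ''
--     if len(intensity_values) != 8:
--         return ''
--     else:
--         for number in intensity_values:
--             char= even_or_odd_bit(number)
--             new_message += char
--         convert= int(new_message,2)
--         new_char= chr(convert)
--         return new_char
-- ===== SOURCE B (Python) =====
-- def decode_single_char(intensity_values):
--     if len(intensity_values) != 8:
--         return ''
--     value = 0
--     for number in intensity_values:
--         value = value * 2 + number % 2
--     return chr(value)
-- ===== Notes on version B (the rewrite author's own statement) =====
-- stated objective: simpler
-- what changed: B replaces the build-a-bit-string-then-int(s,2)-then-chr pipeline (and the even_or_odd_bit helper) with a single Horner-style integer accumulation value = value*2 + number % 2 inside the loop, returning chr(value) directly.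
import Mathlib
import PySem

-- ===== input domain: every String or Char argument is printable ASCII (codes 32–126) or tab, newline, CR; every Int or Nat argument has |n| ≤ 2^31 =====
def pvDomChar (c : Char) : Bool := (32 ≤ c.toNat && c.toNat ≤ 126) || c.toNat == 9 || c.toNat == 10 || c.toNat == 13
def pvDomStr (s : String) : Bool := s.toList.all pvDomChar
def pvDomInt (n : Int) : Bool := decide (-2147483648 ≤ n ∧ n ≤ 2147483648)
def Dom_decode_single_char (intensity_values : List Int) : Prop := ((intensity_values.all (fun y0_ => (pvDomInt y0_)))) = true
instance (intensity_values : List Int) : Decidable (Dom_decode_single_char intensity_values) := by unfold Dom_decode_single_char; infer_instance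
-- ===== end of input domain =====

-- B replaces the bit-string + int(s,2) + chr pipeline by a single Horner-style integer fold (objective: simpler).

-- ===== PORT A =====
-- For Int arguments num % 2 is always 0 or 1, so the implicit UnboundLocalError branch of the
-- Python helper is unreachable; the final else below is dead code kept only to make the match total.
def even_or_odd_bit (num : Int) : String :=
  if PySem.Int.mod num 2 == 1 then "1"
  else if PySem.Int.mod num 2 == 0 then "0"
  else ""

def decode_single_char (intensity_values : List Int) : String :=
  if intensity_values.length ≠ 8 then ""
  else
    let new_message := intensity_values.foldl (fun acc number => acc ++ even_or_odd_bit number) ""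
    -- int(new_message, 2): exact via PySem.Int.ofStrBase?; new_message is always 8 binary digits,
    -- so the none (ValueError) branch is unreachable
    match PySem.Int.ofStrBase? new_message 2 with
    | some convert => String.ofList [Char.ofNat convert.toNat]  -- chr(convert): exact, 0 ≤ convert ≤ 255
    | none => ""

-- ===== PORT B =====
def decode_single_char_alt (intensity_values : List Int) : String :=
  if intensity_values.length ≠ 8 then ""
  else
    let value := intensity_values.foldl (fun v number => v * 2 + PySem.Int.mod number 2) 0
    String.ofList [Char.ofNat value.toNat]  -- chr(value): exact, 0 ≤ value ≤ 255

-- ===== PRECONDITION & SPEC =====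
def Spec_decode_single_char (intensity_values : List Int) (out : String) : Prop := out = decode_single_char_alt intensity_values
instance (intensity_values : List Int) (out : String) : Decidable (Spec_decode_single_char intensity_values out) := by unfold Spec_decode_single_char; infer_instance

-- ===== CLAIM (what is proved, stated in full; the proofs are below) =====
def Claim_equal_decode_single_char : Prop := ∀ (intensity_values : List Int), Dom_decode_single_char intensity_values → Spec_decode_single_char intensity_values (decode_single_char intensity_values)

-- ===== LEMMAS AND PROOFS =====

theorem mod2_cases (n : Int) : PySem.Int.mod n 2 = 0 ∨ PySem.Int.mod n 2 = 1 := by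
  have h0 := PySem.Int.mod_nonneg n (b := 2) (by norm_num)
  have h1 := PySem.Int.mod_lt n (b := 2) (by norm_num)
  omega

-- ===== VERDICT (by name: the statement is the Claim_ definition above) =====
set_option maxHeartbeats 4000000 in
theorem decode_single_char_spec : Claim_equal_decode_single_char := by
  unfold Claim_equal_decode_single_char
  intro l _
  unfold Spec_decode_single_char
  match l with
  | [] | [_] | [_,_] | [_,_,_] | [_,_,_,_] | [_,_,_,_,_] | [_,_,_,_,_,_] | [_,_,_,_,_,_,_] => rfl
  | [a,b,c,d,e,f,g,h] =>
    rcases mod2_cases a with ha|ha <;> rcases mod2_cases b with hb|hb <;>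
    rcases mod2_cases c with hc|hc <;> rcases mod2_cases d with hd|hd <;>
    rcases mod2_cases e with he|he <;> rcases mod2_cases f with hf|hf <;>
    rcases mod2_cases g with hg|hg <;> rcases mod2_cases h with hh|hh <;>
      (simp only [decode_single_char, decode_single_char_alt, even_or_odd_bit, List.foldl,
        List.length_cons, List.length_nil, ha, hb, hc, hd, he, hf, hg, hh]; decide)
  | a::b::c::d::e::f::g::h::i::rest =>
    simp [decode_single_char, decode_single_char_alt]
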